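-- pv_equiv track=rewrite | github.com/tomorrowdevs-projects/programming-basics | projects/m3/005-possible-distance/solutions/ericadegiovanni/m3_005.py | change_coins
-- ===== SOURCE A (Python) =====
-- def change_coins(tot, num_coins, combinations):
--
--   '''
--   Create a program that determines whether or not it is possible to construct a particular total
--   using a specific number of coins.
--   tot: total dollar amount
--   num_coins: number of coins to create the total
--   combinations: list with all the combinations of coins
--   return True if the entered dollar amount can be formed using the number of coins indicated
--   else return False
--   '''
--   # base case
--   if combinations == []:
--     return False
--   else:
--       if sum(combinations[0]) == tot:
--           return True
--       else:
--           return change_coins(tot, num_coins, combinations[1:])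
-- ===== SOURCE B (Python) =====
-- def change_coins(tot, num_coins, combinations):
--     for comb in combinations:
--         if sum(comb) == tot:
--             return True
--     return False
-- ===== Notes on version B (the rewrite author's own statement) =====
-- stated objective: simpler
-- what changed: Replaces the linear recursion with list slicing by a direct iterative loop over the combinations (Python any-style scan), with no slicing and no recursion.
import Mathlib
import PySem

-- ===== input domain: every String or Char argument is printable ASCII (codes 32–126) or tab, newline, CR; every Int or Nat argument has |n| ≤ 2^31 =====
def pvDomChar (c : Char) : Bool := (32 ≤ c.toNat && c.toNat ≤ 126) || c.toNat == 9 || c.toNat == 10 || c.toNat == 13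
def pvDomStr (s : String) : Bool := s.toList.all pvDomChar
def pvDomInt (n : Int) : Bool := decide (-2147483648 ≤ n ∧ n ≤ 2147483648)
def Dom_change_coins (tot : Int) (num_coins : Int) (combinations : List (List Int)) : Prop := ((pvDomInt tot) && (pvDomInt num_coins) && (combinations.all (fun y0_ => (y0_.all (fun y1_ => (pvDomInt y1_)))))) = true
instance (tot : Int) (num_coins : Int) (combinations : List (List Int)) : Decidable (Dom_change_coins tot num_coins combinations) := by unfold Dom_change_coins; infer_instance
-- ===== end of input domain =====

-- B replaces A's head/slice recursion with a direct iterative scan (simpler decomposition).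

-- ===== PORT A =====
-- A: recursion on the list, testing sum of the head, recursing on the tail (combinations[1:]).
def change_coins (tot : Int) (num_coins : Int) (combinations : List (List Int)) : Bool :=
  match combinations with
  | [] => false
  | c :: rest =>
    if c.sum = tot then true
    else change_coins tot num_coins rest

-- ===== PORT B =====
-- B: a single iterative pass, ported as List.any.
def change_coins_alt (tot : Int) (num_coins : Int) (combinations : List (List Int)) : Bool :=
  combinations.any (fun comb => comb.sum = tot)

-- ===== PRECONDITION & SPEC =====
def Spec_change_coins (tot : Int) (num_coins : Int) (combinations : List (List Int)) (out : Bool) : Prop := out = change_coins_alt tot num_coins combinations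
instance (tot : Int) (num_coins : Int) (combinations : List (List Int)) (out : Bool) : Decidable (Spec_change_coins tot num_coins combinations out) := by unfold Spec_change_coins; infer_instance

-- ===== CLAIM (what is proved, stated in full; the proofs are below) =====
def Claim_equal_change_coins : Prop := ∀ (tot : Int) (num_coins : Int) (combinations : List (List Int)), Dom_change_coins tot num_coins combinations → Spec_change_coins tot num_coins combinations (change_coins tot num_coins combinations)

-- ===== LEMMAS AND PROOFS =====
theorem change_coins_eq_alt (tot num_coins : Int) (combinations : List (List Int)) :
    change_coins tot num_coins combinations = change_coins_alt tot num_coins combinations := by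
  induction combinations with
  | nil => rfl
  | cons c rest ih =>
    simp [change_coins, change_coins_alt, List.any_cons] at ih ⊢
    by_cases h : c.sum = tot <;> simp [h, ih]

-- ===== VERDICT (by name: the statement is the Claim_ definition above) =====
theorem change_coins_spec : Claim_equal_change_coins := by
  intro tot num_coins combinations _
  exact change_coins_eq_alt tot num_coins combinations
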